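-- pv_equiv track=rewrite | github.com/tidjanioff/DNA2Protein | project.py | lesGenes
-- ===== SOURCE A (Python) =====
-- def lesGenes(positionsGenes,brinAdn):
--     mesGenes = []
--     mesIndex = []
--     for i in positionsGenes:
--         mesIndex.append(i[0]) # mesIndex représente un tableau contenant
--         mesIndex.append(i[1]) # les positions de début et de fin des gènes
--     monBooleen = False        # successivement, afin de faciliter l'extraction
--     for j in mesIndex:        # des sous-chaînes de caractères correspondant
--         if monBooleen:        # aux gènes.
--             fin = j+1
--             mesGenes.append(brinAdn[debut:fin])
--             monBooleen = False
--         else:                # à l'aide d'un booléen, on récupère nos gènes.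
--             debut = j
--             monBooleen = True
--     return mesGenes
-- ===== SOURCE B (Python) =====
-- def lesGenes(positionsGenes, brinAdn):
--     return [brinAdn[i[0]:i[1] + 1] for i in positionsGenes]
-- ===== Notes on version B (the rewrite author's own statement) =====
-- stated objective: simpler
-- what changed: Replaces A's two passes (flattening the pairs into mesIndex, then a boolean-toggle state machine re-pairing them) with a single direct comprehension slicing brinAdn per pair.
import Mathlib
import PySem

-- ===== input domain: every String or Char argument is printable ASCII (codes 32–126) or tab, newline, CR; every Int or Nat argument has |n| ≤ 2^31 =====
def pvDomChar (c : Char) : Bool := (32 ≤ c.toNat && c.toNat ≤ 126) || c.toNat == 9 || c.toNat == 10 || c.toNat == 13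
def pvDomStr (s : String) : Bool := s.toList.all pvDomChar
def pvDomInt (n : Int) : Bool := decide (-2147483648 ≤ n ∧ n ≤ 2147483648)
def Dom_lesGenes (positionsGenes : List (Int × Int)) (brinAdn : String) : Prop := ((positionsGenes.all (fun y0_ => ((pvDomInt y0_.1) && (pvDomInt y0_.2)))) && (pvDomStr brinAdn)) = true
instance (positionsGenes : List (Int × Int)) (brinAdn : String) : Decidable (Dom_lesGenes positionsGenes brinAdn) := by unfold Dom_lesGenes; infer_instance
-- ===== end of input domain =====

-- B drops A's flatten-then-toggle state machine for one direct slice per pair (simpler decomposition, same cost).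

-- ===== PORT A =====
-- second loop of A: walks the flattened index list with the boolean toggle and the pending 'debut'
def lesGenesLoop (brinAdn : String) (mesIndex : List Int) (monBooleen : Bool) (debut : Int)
    (mesGenes : List String) : List String :=
  match mesIndex with
  | [] => mesGenes
  | j :: rest =>
    if monBooleen then
      lesGenesLoop brinAdn rest false debut
        (mesGenes ++ [PySem.Str.slice brinAdn (some debut) (some (j + 1))])
    else
      lesGenesLoop brinAdn rest true j mesGenes

def lesGenes (positionsGenes : List (Int × Int)) (brinAdn : String) : List String :=
  let mesIndex := positionsGenes.foldl (fun acc i => acc ++ [i.1] ++ [i.2]) []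
  lesGenesLoop brinAdn mesIndex false 0 []

-- ===== PORT B =====
def lesGenes_alt (positionsGenes : List (Int × Int)) (brinAdn : String) : List String :=
  positionsGenes.map (fun i => PySem.Str.slice brinAdn (some i.1) (some (i.2 + 1)))

-- ===== PRECONDITION & SPEC =====
def Spec_lesGenes (positionsGenes : List (Int × Int)) (brinAdn : String) (out : List String) : Prop := out = lesGenes_alt positionsGenes brinAdn
instance (positionsGenes : List (Int × Int)) (brinAdn : String) (out : List String) : Decidable (Spec_lesGenes positionsGenes brinAdn out) := by unfold Spec_lesGenes; infer_instance

-- ===== CLAIM (what is proved, stated in full; the proofs are below) =====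
def Claim_equal_lesGenes : Prop := ∀ (positionsGenes : List (Int × Int)) (brinAdn : String), Dom_lesGenes positionsGenes brinAdn → Spec_lesGenes positionsGenes brinAdn (lesGenes positionsGenes brinAdn)

-- ===== LEMMAS AND PROOFS =====
theorem foldl_flatten (pg : List (Int × Int)) (acc : List Int) :
    pg.foldl (fun a (i : Int × Int) => a ++ [i.1] ++ [i.2]) acc
      = acc ++ (pg.map (fun i => [i.1, i.2])).flatten := by
  induction pg generalizing acc with
  | nil => simp
  | cons h t ih => simp [List.foldl, ih]

theorem loop_map (brinAdn : String) (pg : List (Int × Int)) (d : Int) (acc : List String) :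
    lesGenesLoop brinAdn (pg.map (fun i => [i.1, i.2])).flatten false d acc
      = acc ++ pg.map (fun i => PySem.Str.slice brinAdn (some i.1) (some (i.2 + 1))) := by
  induction pg generalizing d acc with
  | nil => simp [lesGenesLoop]
  | cons h t ih => simp [lesGenesLoop, ih]

-- ===== VERDICT (by name: the statement is the Claim_ definition above) =====
theorem lesGenes_spec : Claim_equal_lesGenes := by
  intro pg brinAdn _
  unfold Spec_lesGenes lesGenes lesGenes_alt
  rw [foldl_flatten]
  simpa using loop_map brinAdn pg 0 []
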